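-- pv_equiv track=rewrite | github.com/mdavydov/Euphemisms | llm_api.py | extract_label_from_response
-- ===== SOURCE A (Python) =====
-- def extract_label_from_response(response: str) -> int:
--     """
--     Extract label (0 or 1) from LLM response.
--
--     Args:
--         response: Raw LLM response string
--
--     Returns:
--         Integer label (0 or 1)
--     """
--     if not response or response == "0 Error":
--         return 0
--
--     # Look for the first digit in the response
--     for char in response:
--         if char == '1':
--             return 1
--         elif char == '0':
--             return 0
--
--     # Default to 0 if no clear label found
--     return 0
-- ===== SOURCE B (Python) =====
-- def extract_label_from_response(response: str) -> int:
--     """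
--     Extract label (0 or 1) from LLM response.
--
--     Args:
--         response: Raw LLM response string
--
--     Returns:
--         Integer label (0 or 1)
--     """
--     if not response:
--         return 0
--     i1 = response.find('1')
--     i0 = response.find('0')
--     return 1 if i1 != -1 and (i0 == -1 or i1 < i0) else 0
-- ===== Notes on version B (the rewrite author's own statement) =====
-- stated objective: simpler
-- what changed: Replaces the early-exit character loop (and the redundant "0 Error" special case, which already yields 0) by two independent str.find position lookups whose relative order decides the label.
import Mathlib
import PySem

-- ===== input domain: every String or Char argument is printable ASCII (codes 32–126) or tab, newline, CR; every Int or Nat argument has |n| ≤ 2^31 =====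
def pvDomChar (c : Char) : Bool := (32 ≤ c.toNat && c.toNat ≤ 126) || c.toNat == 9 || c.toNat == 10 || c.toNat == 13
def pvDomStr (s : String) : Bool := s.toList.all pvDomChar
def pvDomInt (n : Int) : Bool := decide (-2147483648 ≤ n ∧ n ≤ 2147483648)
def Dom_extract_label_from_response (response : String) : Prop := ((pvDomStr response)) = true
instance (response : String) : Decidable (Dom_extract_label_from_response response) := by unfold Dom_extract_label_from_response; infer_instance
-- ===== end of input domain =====

-- B replaces A's early-exit character loop (and the redundant "0 Error" case, which already yields 0)
-- by two independent find-position lookups whose relative order decides the label: simpler decomposition.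


-- ===== PORT A =====
-- the 'for char in response' loop with its early returns
def pvLoopA : List Char → Int
  | [] => 0
  | c :: cs => if c = '1' then 1 else if c = '0' then 0 else pvLoopA cs

def extract_label_from_response (response : String) : Int :=
  if response = "" ∨ response = "0 Error" then 0
  else pvLoopA response.toList

-- ===== PORT B =====
def extract_label_from_response_alt (response : String) : Int :=
  if response = "" then 0
  else
    let i1 := PySem.Str.find response "1"
    let i0 := PySem.Str.find response "0"
    if i1 ≠ -1 ∧ (i0 = -1 ∨ i1 < i0) then 1 else 0

-- ===== PRECONDITION & SPEC =====
def Spec_extract_label_from_response (response : String) (out : Int) : Prop := out = extract_label_from_response_alt response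
instance (response : String) (out : Int) : Decidable (Spec_extract_label_from_response response out) := by unfold Spec_extract_label_from_response; infer_instance

-- ===== CLAIM (what is proved, stated in full; the proofs are below) =====
def Claim_equal_extract_label_from_response : Prop := ∀ (response : String), Dom_extract_label_from_response response → Spec_extract_label_from_response response (extract_label_from_response response)

-- ===== LEMMAS AND PROOFS =====

-- find is characterised by 'prefix at n, no prefix earlier'
theorem pv_find_eq_of (s sub : List Char) (n : Nat) (h1 : sub <+: s.drop n)
    (h2 : ∀ i < n, ¬ sub <+: s.drop i) : PySem.Chars.find s sub = n := by
  have hin : PySem.Chars.isIn sub s = true :=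
    (PySem.Chars.exists_prefix_drop_iff_isIn sub s).1 ⟨n, h1⟩
  have hnn : 0 ≤ PySem.Chars.find s sub :=
    (PySem.Chars.find_nonneg_iff s sub).2 ((PySem.Chars.isIn_iff_infix sub s).1 hin)
  obtain ⟨hp, hmin⟩ := PySem.Chars.find_spec hnn
  have : (PySem.Chars.find s sub).toNat = n := by
    rcases Nat.lt_trichotomy (PySem.Chars.find s sub).toNat n with h | h | h
    · exact absurd hp (h2 _ h)
    · exact h
    · exact absurd h1 (hmin n h)
  omega

-- cons recursion of find for a single-character pattern
theorem pv_find_single_cons (c d : Char) (l : List Char) :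
    PySem.Chars.find (c :: l) [d] =
      if c = d then 0
      else if PySem.Chars.find l [d] = -1 then -1
      else PySem.Chars.find l [d] + 1 := by
  split_ifs with h1 h2
  · subst h1
    exact pv_find_eq_of _ _ 0 (by simp) (by omega)
  · rw [PySem.Chars.find_eq_neg_one_iff] at h2 ⊢
    intro hinf
    rcases (List.infix_cons_iff).1 hinf with hpre | htail
    · rcases hpre with ⟨t, ht⟩
      simp at ht
      exact h1 ht.1.symm
    · exact h2 htail
  · have hnn : 0 ≤ PySem.Chars.find l [d] := by
      have := PySem.Chars.neg_one_le_find l [d]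
      omega
    obtain ⟨hp, hmin⟩ := PySem.Chars.find_spec hnn
    have := pv_find_eq_of (c :: l) [d] ((PySem.Chars.find l [d]).toNat + 1)
      (by simpa using hp)
      (by
        intro i hi
        match i with
        | 0 =>
          simp only [List.drop_zero]
          intro hpre
          rcases hpre with ⟨t, ht⟩
          simp at ht
          exact h1 ht.1.symm
        | (j+1) =>
          simp only [List.drop_succ_cons]
          exact hmin j (by omega))
    omega

-- the loop equals the find-comparison formula
theorem pv_loop_eq (l : List Char) :
    pvLoopA l =
      if PySem.Chars.find l ['1'] ≠ -1 ∧
          (PySem.Chars.find l ['0'] = -1 ∨ PySem.Chars.find l ['1'] < PySem.Chars.find l ['0'])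
        then 1 else 0 := by
  induction l with
  | nil => decide
  | cons c cs ih =>
    rw [show pvLoopA (c :: cs) = if c = '1' then 1 else if c = '0' then 0 else pvLoopA cs from rfl,
      pv_find_single_cons c '1' cs, pv_find_single_cons c '0' cs, ih]
    have h1 := PySem.Chars.neg_one_le_find cs ['1']
    have h0 := PySem.Chars.neg_one_le_find cs ['0']
    split_ifs <;> (try simp_all) <;> omega

-- ===== VERDICT (by name: the statement is the Claim_ definition above) =====
theorem extract_label_from_response_spec : Claim_equal_extract_label_from_response := by
  intro response _
  unfold Spec_extract_label_from_response extract_label_from_response extract_label_from_response_alt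
  by_cases he : response = ""
  · simp [he]
  · by_cases hz : response = "0 Error"
    · subst hz; decide
    · simp only [he, hz, or_self, if_false]
      have b1 : PySem.Str.find response "1" = PySem.Chars.find response.toList ['1'] := by
        simp [PySem.Str.find_eq]
      have b0 : PySem.Str.find response "0" = PySem.Chars.find response.toList ['0'] := by
        simp [PySem.Str.find_eq]
      rw [b1, b0, pv_loop_eq]
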